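-- pv_equiv track=rewrite | github.com/CodeTechBen/westmarch_pipeline | ETL/dndbeyond_utils.py | get_base_stats
-- ===== SOURCE A (Python) =====
-- from typing import Any, Optional
--
-- STAT_ID_TO_NAME: dict[int, str] = {
--     1: "strength",
--     2: "dexterity",
--     3: "constitution",
--     4: "intelligence",
--     5: "wisdom",
--     6: "charisma",
-- }
--
-- def safe_int(value: Any, default: int = 0) -> int:
--     if isinstance(value, bool):
--         return int(value)
--     if isinstance(value, (int, float)):
--         return int(value)
--     return default
--
-- def get_base_stats(data: dict[str, Any]) -> dict[str, int]:
--     base = {name: 0 for name in STAT_ID_TO_NAME.values()}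
--
--     for stat in data.get("stats", []):
--         if not isinstance(stat, dict):
--             continue
--         stat_id = stat.get("id")
--         if stat_id in STAT_ID_TO_NAME:
--             base[STAT_ID_TO_NAME[stat_id]] = safe_int(stat.get("value"))
--
--     return base
-- ===== SOURCE B (Python) =====
-- STAT_ID_TO_NAME: dict[int, str] = {
--     1: "strength",
--     2: "dexterity",
--     3: "constitution",
--     4: "intelligence",
--     5: "wisdom",
--     6: "charisma",
-- }
--
-- def safe_int(value, default=0):
--     if isinstance(value, bool):
--         return int(value)
--     if isinstance(value, (int, float)):
--         return int(value)
--     return default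
--
-- def get_base_stats(data):
--     index = {}
--     for stat in data.get("stats", []):
--         if isinstance(stat, dict):
--             index[stat.get("id")] = stat.get("value")
--     return {name: (safe_int(index[sid]) if sid in index else 0)
--             for sid, name in STAT_ID_TO_NAME.items()}
-- ===== Notes on version B (the rewrite author's own statement) =====
-- stated objective: alternative
-- what changed: B replaces A's guarded in-place update of a pre-seeded result dict with a two-pass shape: first build an id->value index from the stats list (last-wins), then project the result by iterating the six fixed stat names and looking each id up in the index.
import Mathlib
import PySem

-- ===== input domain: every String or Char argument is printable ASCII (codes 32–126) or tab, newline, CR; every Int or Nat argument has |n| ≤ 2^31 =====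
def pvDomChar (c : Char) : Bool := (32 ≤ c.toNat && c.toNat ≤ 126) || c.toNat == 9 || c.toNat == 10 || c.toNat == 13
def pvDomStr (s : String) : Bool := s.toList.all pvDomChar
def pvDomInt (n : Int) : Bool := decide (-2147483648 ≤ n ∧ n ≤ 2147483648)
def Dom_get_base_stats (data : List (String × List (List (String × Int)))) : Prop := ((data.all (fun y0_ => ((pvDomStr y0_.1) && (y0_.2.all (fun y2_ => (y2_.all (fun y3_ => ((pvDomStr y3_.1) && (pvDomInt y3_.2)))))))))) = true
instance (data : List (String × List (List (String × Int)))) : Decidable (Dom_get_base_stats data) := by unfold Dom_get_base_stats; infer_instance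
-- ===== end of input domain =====

-- B builds an id->value index first and then projects it over the six fixed stat names,
-- instead of A's guarded in-place updates of a pre-seeded result dict (objective: alternative).
-- On the typed domain (stats entries are dicts str->int) both are total; no Pre_ needed.

-- STAT_ID_TO_NAME, shared module constant
def statIdToName : PySem.Dict Int String :=
  PySem.Dict.ofList [(1, "strength"), (2, "dexterity"), (3, "constitution"),
                     (4, "intelligence"), (5, "wisdom"), (6, "charisma")]

-- safe_int: on this typed domain value is Option Int (None or an int); bool/float branches are unreachable
def safe_int (value : Option Int) (default : Int) : Int :=
  match value with
  | some n => n
  | none => default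

-- ===== PORT A =====
def get_base_stats (data : List (String × List (List (String × Int)))) : List (String × Int) :=
  -- base = {name: 0 for name in STAT_ID_TO_NAME.values()}
  let base0 : PySem.Dict String Int :=
    PySem.Dict.ofList ((PySem.Dict.values statIdToName).map (fun name => (name, (0 : Int))))
  -- for stat in data.get("stats", []): … (every stat is a dict here, so the isinstance guard passes)
  let stats : List (List (String × Int)) := ((PySem.Dict.mk data).get? "stats").getD []
  let base := stats.foldl (fun b stat =>
    let stat_id : Option Int := (PySem.Dict.mk stat).get? "id"
    match stat_id with
    | some i =>
        if (statIdToName.get? i).isSome then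
          b.insert ((statIdToName.get? i).getD "") (safe_int ((PySem.Dict.mk stat).get? "value") 0)
        else b
    | none => b) base0
  base.items

-- ===== PORT B =====
def get_base_stats_alt (data : List (String × List (List (String × Int)))) : List (String × Int) :=
  let stats : List (List (String × Int)) := ((PySem.Dict.mk data).get? "stats").getD []
  -- index[stat.get("id")] = stat.get("value")  (keys are Option Int: id may be absent)
  let index : PySem.Dict (Option Int) (Option Int) :=
    stats.foldl (fun d stat =>
      d.insert ((PySem.Dict.mk stat).get? "id") ((PySem.Dict.mk stat).get? "value"))
      PySem.Dict.empty
  -- {name: safe_int(index[sid]) if sid in index else 0 for sid, name in STAT_ID_TO_NAME.items()}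
  statIdToName.items.map (fun p =>
    (p.2, match index.get? (some p.1) with
          | some v => safe_int v 0
          | none => 0))

-- ===== PRECONDITION & SPEC =====
def Spec_get_base_stats (data : List (String × List (List (String × Int)))) (out : List (String × Int)) : Prop := out = get_base_stats_alt data
instance (data : List (String × List (List (String × Int)))) (out : List (String × Int)) : Decidable (Spec_get_base_stats data out) := by unfold Spec_get_base_stats; infer_instance

-- ===== CLAIM (what is proved, stated in full; the proofs are below) =====
def Claim_equal_get_base_stats : Prop := ∀ (data : List (String × List (List (String × Int)))), Dom_get_base_stats data → Spec_get_base_stats data (get_base_stats data)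

-- ===== LEMMAS AND PROOFS =====

-- project an index dict onto the six-name result dict (B's projection, as a Dict)
lemma statIdToName_mk : statIdToName = PySem.Dict.mk
    [(1, "strength"), (2, "dexterity"), (3, "constitution"),
     (4, "intelligence"), (5, "wisdom"), (6, "charisma")] := by decide

def prj (idx : PySem.Dict (Option Int) (Option Int)) : PySem.Dict String Int :=
  PySem.Dict.mk (statIdToName.items.map (fun p =>
    (p.2, match idx.get? (some p.1) with
          | some v => safe_int v 0
          | none => 0)))

lemma prj_empty : prj PySem.Dict.empty =
    PySem.Dict.ofList ((PySem.Dict.values statIdToName).map (fun name => (name, (0 : Int)))) := by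
  decide

-- one A-step on the projection equals projecting after one B-step
lemma step_prj (idx : PySem.Dict (Option Int) (Option Int)) (stat : List (String × Int)) :
    (match (PySem.Dict.mk stat).get? "id" with
     | some i =>
        if (statIdToName.get? i).isSome then
          (prj idx).insert ((statIdToName.get? i).getD "") (safe_int ((PySem.Dict.mk stat).get? "value") 0)
        else prj idx
     | none => prj idx)
    = prj (idx.insert ((PySem.Dict.mk stat).get? "id") ((PySem.Dict.mk stat).get? "value")) := by
  generalize (PySem.Dict.mk stat).get? "id" = k
  generalize (PySem.Dict.mk stat).get? "value" = v
  cases k with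
  | none =>
      simp only [prj, statIdToName_mk, PySem.Dict.get?_insert]
      simp
  | some i =>
      by_cases h1 : i = 1
      · subst h1
        simp only [prj, statIdToName_mk, PySem.Dict.get?_insert]
        simp [PySem.Dict.insert, PySem.Dict.get?_mk_cons]
      by_cases h2 : i = 2
      · subst h2
        simp only [prj, statIdToName_mk, PySem.Dict.get?_insert]
        simp [PySem.Dict.insert, PySem.Dict.get?_mk_cons]
      by_cases h3 : i = 3
      · subst h3
        simp only [prj, statIdToName_mk, PySem.Dict.get?_insert]
        simp [PySem.Dict.insert, PySem.Dict.get?_mk_cons]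
      by_cases h4 : i = 4
      · subst h4
        simp only [prj, statIdToName_mk, PySem.Dict.get?_insert]
        simp [PySem.Dict.insert, PySem.Dict.get?_mk_cons]
      by_cases h5 : i = 5
      · subst h5
        simp only [prj, statIdToName_mk, PySem.Dict.get?_insert]
        simp [PySem.Dict.insert, PySem.Dict.get?_mk_cons]
      by_cases h6 : i = 6
      · subst h6
        simp only [prj, statIdToName_mk, PySem.Dict.get?_insert]
        simp [PySem.Dict.insert, PySem.Dict.get?_mk_cons]
      · simp only [prj, statIdToName_mk, PySem.Dict.get?_insert]
        simp [PySem.Dict.get?,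
              Ne.symm h1, Ne.symm h2, Ne.symm h3, Ne.symm h4, Ne.symm h5, Ne.symm h6]

-- the folds agree: A's fold from the projection equals the projection of B's fold
lemma fold_prj (stats : List (List (String × Int))) (idx : PySem.Dict (Option Int) (Option Int)) :
    stats.foldl (fun b stat =>
      match (PySem.Dict.mk stat).get? "id" with
      | some i =>
          if (statIdToName.get? i).isSome then
            b.insert ((statIdToName.get? i).getD "") (safe_int ((PySem.Dict.mk stat).get? "value") 0)
          else b
      | none => b) (prj idx)
    = prj (stats.foldl (fun d stat =>
        d.insert ((PySem.Dict.mk stat).get? "id") ((PySem.Dict.mk stat).get? "value")) idx) := by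
  induction stats generalizing idx with
  | nil => rfl
  | cons s rest ih =>
      simp only [List.foldl_cons]
      rw [step_prj, ih]

-- ===== VERDICT (by name: the statement is the Claim_ definition above) =====
theorem get_base_stats_spec : Claim_equal_get_base_stats := by
  intro data _
  show get_base_stats data = get_base_stats_alt data
  simp only [get_base_stats, get_base_stats_alt]
  rw [← prj_empty, fold_prj]
  rfl
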